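-- pv_equiv track=rewrite | github.com/JLarry00/IA | pacman/othello.py | from_dictionary_to_array_board
-- ===== SOURCE A (Python) =====
-- def from_dictionary_to_array_board(board_dictionary, height, width):
--     """From dictionary to array representation."""
--     board_array = []
--
--     for i in range(height):
--         board_array.append('')
--         for j in range(width):
--             key = (j + 1, i + 1)
--             if key in board_dictionary:
--                 board_array[i] += board_dictionary[key]
--             else:
--                 board_array[i] += '.'
--
--     return board_array
-- ===== SOURCE B (Python) =====
-- def from_dictionary_to_array_board(board_dictionary, height, width):
--     """From dictionary to array representation (sparse pass over the dict)."""
--     grid = [['.'] * width for _ in range(height)]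
--     for (x, y), value in board_dictionary.items():
--         if 1 <= x <= width and 1 <= y <= height:
--             grid[y - 1][x - 1] = value
--     return [''.join(row) for row in grid]
-- ===== Notes on version B (the rewrite author's own statement) =====
-- stated objective: faster
-- what changed: Instead of scanning every cell and looking each coordinate up in the dict, B pre-fills a height x width grid with '.', does one sparse pass over the dict entries writing in-bounds cells, and joins the rows; per-cell dict lookups disappear.
import Mathlib
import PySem

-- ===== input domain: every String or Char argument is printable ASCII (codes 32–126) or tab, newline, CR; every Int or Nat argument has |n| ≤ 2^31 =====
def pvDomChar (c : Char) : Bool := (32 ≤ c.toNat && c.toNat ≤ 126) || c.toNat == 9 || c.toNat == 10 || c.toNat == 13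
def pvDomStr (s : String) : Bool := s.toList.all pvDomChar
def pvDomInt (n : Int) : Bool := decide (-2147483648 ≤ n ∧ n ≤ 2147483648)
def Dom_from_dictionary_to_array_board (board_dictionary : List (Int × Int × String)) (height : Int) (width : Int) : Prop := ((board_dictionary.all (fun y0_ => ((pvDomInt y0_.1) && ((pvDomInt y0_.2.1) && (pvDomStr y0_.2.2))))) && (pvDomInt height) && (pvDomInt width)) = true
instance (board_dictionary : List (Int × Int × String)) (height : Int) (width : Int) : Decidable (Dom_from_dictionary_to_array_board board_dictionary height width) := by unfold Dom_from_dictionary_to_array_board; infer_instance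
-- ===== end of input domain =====

-- B pre-fills the grid with '.' and makes one sparse pass over the dict entries instead of a per-cell lookup scan; faster by avoiding a dict lookup per cell.


-- ===== PORT A =====
-- first-match association-list lookup = 'key in board_dictionary' + 'board_dictionary[key]'
def pvLookup (d : List (Int × Int × String)) (k : Int × Int) : Option String :=
  match d with
  | [] => none
  | (x, y, v) :: rest => if (x, y) = k then some v else pvLookup rest k

-- string concatenation 'board_array[i] += …' is ported on List Char (PySem's string domain); exact
def from_dictionary_to_array_board (board_dictionary : List (Int × Int × String)) (height : Int) (width : Int) : List String :=
  (PySem.List.pyRange 0 height 1).foldl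
    (fun board_array i =>
      board_array ++ [String.ofList
        ((PySem.List.pyRange 0 width 1).foldl
          (fun row j =>
            match pvLookup board_dictionary (j + 1, i + 1) with
            | some v => row ++ v.toList
            | none => row ++ ['.']) [])]) []

-- ===== PORT B =====
def from_dictionary_to_array_board_alt (board_dictionary : List (Int × Int × String)) (height : Int) (width : Int) : List String :=
  let grid0 : List (List String) := List.replicate height.toNat (List.replicate width.toNat ".")
  let grid := board_dictionary.foldl
    (fun g e =>
      if 1 ≤ e.1 ∧ e.1 ≤ width ∧ 1 ≤ e.2.1 ∧ e.2.1 ≤ height then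
        g.set (e.2.1 - 1).toNat ((g.getD (e.2.1 - 1).toNat []).set (e.1 - 1).toNat e.2.2)
      else g) grid0
  grid.map (fun row => PySem.Str.join "" row)

-- ===== PRECONDITION & SPEC =====
-- Pre_ excludes association lists with duplicate keys: those cannot arise from a Python dict (which has unique keys), and on them A's first-binding read vs B's last-write are both accidental.
def Pre_from_dictionary_to_array_board (board_dictionary : List (Int × Int × String)) (height : Int) (width : Int) : Prop :=
  (board_dictionary.map (fun e => (e.1, e.2.1))).Nodup
instance (board_dictionary : List (Int × Int × String)) (height : Int) (width : Int) : Decidable (Pre_from_dictionary_to_array_board board_dictionary height width) := by unfold Pre_from_dictionary_to_array_board; infer_instance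

def pvWitness_from_dictionary_to_array_board : (List (Int × Int × String)) × Int × Int := ([(1, 1, "x"), (2, 2, "o")], 2, 3)

def Spec_from_dictionary_to_array_board (board_dictionary : List (Int × Int × String)) (height : Int) (width : Int) (out : List String) : Prop := out = from_dictionary_to_array_board_alt board_dictionary height width
instance (board_dictionary : List (Int × Int × String)) (height : Int) (width : Int) (out : List String) : Decidable (Spec_from_dictionary_to_array_board board_dictionary height width out) := by unfold Spec_from_dictionary_to_array_board; infer_instance

-- ===== CLAIM (what is proved, stated in full; the proofs are below) =====
def Claim_equal_from_dictionary_to_array_board : Prop := ∀ (board_dictionary : List (Int × Int × String)) (height : Int) (width : Int), Dom_from_dictionary_to_array_board board_dictionary height width → Pre_from_dictionary_to_array_board board_dictionary height width → Spec_from_dictionary_to_array_board board_dictionary height width (from_dictionary_to_array_board board_dictionary height width)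

-- ===== LEMMAS AND PROOFS =====

-- join with the empty separator is flatten
theorem pvJoinEmpty (ls : List (List Char)) : PySem.Chars.join [] ls = ls.flatten := by
  induction ls with
  | nil => rfl
  | cons a t ih =>
    cases t with
    | nil => simp [PySem.Chars.join, List.intercalate]
    | cons b t2 =>
      rw [PySem.Chars.join_cons_cons]
      simpa using ih

-- the cell branch of A's inner loop, as an Option.getD
theorem pvMatchAppend (d : List (Int × Int × String)) (k : Int × Int) (row : List Char) :
    (match pvLookup d k with
     | some v => row ++ v.toList
     | none => row ++ ['.']) = row ++ ((pvLookup d k).getD ".").toList := by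
  cases h : pvLookup d k <;> simp


theorem pvGetDMem {α : Type} (g : List (List α)) (a : Nat) (h : a < g.length) : g.getD a [] ∈ g := by
  rw [List.getD_eq_getElem?_getD, List.getElem?_eq_getElem h]
  simp only [Option.getD_some]
  exact List.getElem_mem h

theorem pvLookup_eq_none (d : List (Int × Int × String)) (k : Int × Int)
    (h : k ∉ d.map (fun e => (e.1, e.2.1))) : pvLookup d k = none := by
  induction d with
  | nil => rfl
  | cons e t ih =>
    obtain ⟨x, y, v⟩ := e
    simp only [List.map_cons, List.mem_cons, not_or] at h
    simp only [pvLookup, if_neg (fun hh => h.1 (Eq.symm hh))]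
    exact ih h.2

-- B's fold over the dict entries preserves the grid's length
theorem pvFoldLength (height width : Int) (d : List (Int × Int × String)) :
    ∀ g : List (List String),
    (d.foldl (fun g e =>
      if 1 ≤ e.1 ∧ e.1 ≤ width ∧ 1 ≤ e.2.1 ∧ e.2.1 ≤ height then
        g.set (e.2.1 - 1).toNat ((g.getD (e.2.1 - 1).toNat []).set (e.1 - 1).toNat e.2.2)
      else g) g).length = g.length := by
  induction d with
  | nil => intro g; rfl
  | cons e t ih =>
    intro g
    simp only [List.foldl_cons]
    rw [ih]
    split <;> simp

-- B's fold preserves the length of every row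
theorem pvFoldRows (height width : Int) (n : Nat) (d : List (Int × Int × String)) :
    ∀ g : List (List String), (∀ r ∈ g, r.length = n) →
    ∀ r ∈ (d.foldl (fun g e =>
      if 1 ≤ e.1 ∧ e.1 ≤ width ∧ 1 ≤ e.2.1 ∧ e.2.1 ≤ height then
        g.set (e.2.1 - 1).toNat ((g.getD (e.2.1 - 1).toNat []).set (e.1 - 1).toNat e.2.2)
      else g) g), r.length = n := by
  induction d with
  | nil => intro g hg; exact hg
  | cons e t ih =>
    intro g hg
    simp only [List.foldl_cons]
    apply ih
    split
    · intro r hr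
      by_cases hlt : (e.2.1 - 1).toNat < g.length
      · rcases List.mem_or_eq_of_mem_set hr with h | h
        · exact hg r h
        · subst h
          rw [List.length_set]
          exact hg _ (pvGetDMem g _ hlt)
      · rw [List.set_eq_of_length_le (by omega)] at hr
        exact hg r hr
    · exact hg

-- the value of one cell after B's fold: the first dict binding for that cell, else the old cell
theorem pvFoldCell (height width : Int) (d : List (Int × Int × String)) :
    ∀ (g : List (List String)) (i j : Nat),
    (d.map (fun e => (e.1, e.2.1))).Nodup →
    g.length = height.toNat → (∀ r ∈ g, r.length = width.toNat) →
    i < height.toNat → j < width.toNat →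
    (((d.foldl (fun g e =>
      if 1 ≤ e.1 ∧ e.1 ≤ width ∧ 1 ≤ e.2.1 ∧ e.2.1 ≤ height then
        g.set (e.2.1 - 1).toNat ((g.getD (e.2.1 - 1).toNat []).set (e.1 - 1).toNat e.2.2)
      else g) g).getD i []).getD j ".") =
      (pvLookup d ((j : Int) + 1, (i : Int) + 1)).getD ((g.getD i []).getD j ".") := by
  induction d with
  | nil => intro g i j _ _ _ _ _; simp [pvLookup]
  | cons e t ih =>
    intro g i j hnd hlen hrows hi hj
    obtain ⟨x, y, v⟩ := e
    rw [List.map_cons, List.nodup_cons] at hnd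
    obtain ⟨hnotin, hnd'⟩ := hnd
    simp only [List.foldl_cons]
    by_cases hk : ((x, y) : Int × Int) = ((j : Int) + 1, (i : Int) + 1)
    · obtain ⟨hx, hy⟩ := Prod.mk.injEq .. ▸ hk
      have hb : 1 ≤ x ∧ x ≤ width ∧ 1 ≤ y ∧ y ≤ height := by
        subst hx; subst hy; omega
      simp only [if_pos hb]
      have hrowlen : (g.getD (y - 1).toNat []).length = width.toNat := by
        have hyl : (y - 1).toNat < g.length := by omega
        exact hrows _ (pvGetDMem g _ hyl)
      rw [ih _ i j hnd' (by rw [List.length_set]; exact hlen)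
        (by
          intro r hr
          rcases List.mem_or_eq_of_mem_set hr with h | h
          · exact hrows r h
          · subst h; rw [List.length_set]; exact hrowlen) hi hj]
      rw [pvLookup_eq_none t _ (by rwa [hk] at hnotin)]
      simp only [pvLookup, if_pos hk, Option.getD_some, Option.getD_none]
      have hyi : (y - 1).toNat = i := by omega
      have hxj : (x - 1).toNat = j := by omega
      have hIg : i < g.length := by omega
      have hgil : g[i].length = width.toNat := hrows _ (List.getElem_mem hIg)
      simp [List.getD_eq_getElem?_getD, hyi, hxj, hj, hIg, hgil]
    · simp only [pvLookup, if_neg hk]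
      by_cases hb : 1 ≤ x ∧ x ≤ width ∧ 1 ≤ y ∧ y ≤ height
      · simp only [if_pos hb]
        by_cases hlt : (y - 1).toNat < g.length
        · have hrowlen : (g.getD (y - 1).toNat []).length = width.toNat :=
            hrows _ (pvGetDMem g _ hlt)
          rw [ih _ i j hnd' (by rw [List.length_set]; exact hlen)
            (by
              intro r hr
              rcases List.mem_or_eq_of_mem_set hr with h | h
              · exact hrows r h
              · subst h; rw [List.length_set]; exact hrowlen) hi hj]
          congr 1
          by_cases hyi : (y - 1).toNat = i
          · have hxj : (x - 1).toNat ≠ j := by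
              intro hxj
              apply hk
              have : x = (j : Int) + 1 := by omega
              have : y = (i : Int) + 1 := by omega
              simp_all
            have hIg : i < g.length := by omega
            have hgil : g[i].length = width.toNat := hrows _ (List.getElem_mem hIg)
            have hxj2 : x.toNat - 1 ≠ j := by omega
            simp [List.getD_eq_getElem?_getD, hyi, hxj2, hIg, hgil, hj]
          · have hyi2 : y.toNat - 1 ≠ i := by omega
            simp [List.getD_eq_getElem?_getD, hyi2]
        · rw [List.set_eq_of_length_le (by omega)]
          exact ih _ i j hnd' hlen hrows hi hj
      · simp only [if_neg hb]
        exact ih _ i j hnd' hlen hrows hi hj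

theorem pvGetDEq {α : Type} (g : List α) (dflt : α) (i : Nat) (h : i < g.length) : g.getD i dflt = g[i] := by
  rw [List.getD_eq_getElem?_getD, List.getElem?_eq_getElem h]
  simp only [Option.getD_some]

-- the i-th row of B's grid is the lookup-valued row
theorem pvGridRow (height width : Int) (d : List (Int × Int × String))
    (hpre : (d.map (fun e => (e.1, e.2.1))).Nodup) (i : Nat) (hi : i < height.toNat) :
    ((d.foldl (fun g e =>
      if 1 ≤ e.1 ∧ e.1 ≤ width ∧ 1 ≤ e.2.1 ∧ e.2.1 ≤ height then
        g.set (e.2.1 - 1).toNat ((g.getD (e.2.1 - 1).toNat []).set (e.1 - 1).toNat e.2.2)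
      else g) (List.replicate height.toNat (List.replicate width.toNat ".")))).getD i [] =
    (PySem.List.pyRange 0 width 1).map (fun j => (pvLookup d (j + 1, (i : Int) + 1)).getD ".") := by
  have hbase : ∀ r ∈ List.replicate height.toNat (List.replicate width.toNat ("." : String)), r.length = width.toNat := by
    intro r hr
    rw [List.eq_of_mem_replicate hr]
    exact List.length_replicate
  have hflen : (d.foldl (fun g e =>
      if 1 ≤ e.1 ∧ e.1 ≤ width ∧ 1 ≤ e.2.1 ∧ e.2.1 ≤ height then
        g.set (e.2.1 - 1).toNat ((g.getD (e.2.1 - 1).toNat []).set (e.1 - 1).toNat e.2.2)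
      else g) (List.replicate height.toNat (List.replicate width.toNat "."))).length = height.toNat := by
    rw [pvFoldLength]
    exact List.length_replicate
  have hrows := pvFoldRows height width width.toNat d _ hbase
  apply List.ext_getElem
  · rw [hrows _ (pvGetDMem _ i (by rw [hflen]; exact hi))]
    simp [PySem.List.length_pyRange_one]
  · intro j h1 h2
    have hj : j < width.toNat := by
      rw [hrows _ (pvGetDMem _ i (by rw [hflen]; exact hi))] at h1
      exact h1
    rw [List.getElem_map, PySem.List.getElem_pyRange_one]
    rw [← pvGetDEq _ "." j h1]
    rw [pvFoldCell height width d _ i j hpre (by simp) hbase hi hj]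
    have hdot : ((List.replicate height.toNat (List.replicate width.toNat ".")).getD i []).getD j "." = "." := by
      rw [pvGetDEq _ _ i (by simpa using hi)]
      simp [List.getElem_replicate, hj]
    rw [hdot]
    norm_num

-- ===== VERDICT (by name: the statement is the Claim_ definition above) =====
theorem from_dictionary_to_array_board_spec : Claim_equal_from_dictionary_to_array_board := by
  intro d height width _ hpre
  unfold Spec_from_dictionary_to_array_board
  unfold from_dictionary_to_array_board from_dictionary_to_array_board_alt
  rw [PySem.List.foldl_append_singleton_eq_map]
  simp only [List.nil_append]
  apply List.ext_getElem
  · simp only [List.length_map, PySem.List.length_pyRange_one, pvFoldLength, List.length_replicate]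
    omega
  · intro i h1 h2
    have hi' : i < height.toNat := by
      simpa [PySem.List.length_pyRange_one] using h1
    simp only [List.getElem_map, PySem.List.getElem_pyRange_one, zero_add]
    have h2' : i < (d.foldl (fun g e =>
        if 1 ≤ e.1 ∧ e.1 ≤ width ∧ 1 ≤ e.2.1 ∧ e.2.1 ≤ height then
          g.set (e.2.1 - 1).toNat ((g.getD (e.2.1 - 1).toNat []).set (e.1 - 1).toNat e.2.2)
        else g) (List.replicate height.toNat (List.replicate width.toNat "."))).length := by
      rw [pvFoldLength]
      simpa using hi'
    rw [← pvGetDEq _ [] i h2', pvGridRow height width d hpre i hi']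
    rw [← String.toList_inj]
    simp only [String.toList_ofList, PySem.Str.toList_join]
    simp only [pvMatchAppend]
    rw [PySem.List.foldl_append_eq_flatMap]
    simp only [List.nil_append, List.map_map]
    rw [show ("" : String).toList = [] from rfl, pvJoinEmpty]
    rw [List.flatMap_def]
    rfl
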